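-- pv_equiv track=rewrite | github.com/Nsivaa/AIF | search.py | frontier_position2
-- ===== SOURCE A (Python) =====
-- from itertools import groupby
--
-- def frontier_position2(possible_targets):
--     # Ordina le tuple prima per il primo elemento (x) e poi per il secondo (y)
--     sorted_tuples = sorted(possible_targets, key=lambda x: (x[0], x[1]))
--
--     # Raggruppa le tuple per il primo elemento
--     grouped = groupby(sorted_tuples, key=lambda x: x[0])
--     results = []
--     for _, group in grouped:
--         tuples = list(group)
--         min_tuple = min(tuples, key=lambda x: x[1])
--         max_tuple = max(tuples, key=lambda x: x[1])
--         results.append(min_tuple)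
--         if min_tuple != max_tuple:
--             results.append(max_tuple)
--
--     return results
-- ===== SOURCE B (Python) =====
-- def frontier_position2(possible_targets):
--     # One pass: per-x table of (min-tuple, max-tuple), then emit in sorted-x order.
--     table = {}
--     for t in possible_targets:
--         e = table.get(t[0])
--         if e is None:
--             table[t[0]] = (t, t)
--         else:
--             lo, hi = e
--             if t[1] < lo[1]:
--                 lo = t
--             if t[1] > hi[1]:
--                 hi = t
--             table[t[0]] = (lo, hi)
--     results = []
--     for x in sorted(table):
--         lo, hi = table[x]
--         results.append(lo)
--         if hi != lo:
--             results.append(hi)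
--     return results
-- ===== Notes on version B (the rewrite author's own statement) =====
-- stated objective: alternative
-- what changed: Replaces sort-all-tuples + itertools.groupby + per-group min/max scans with a single pass building a dict x -> (min_tuple, max_tuple), followed by one sort of the distinct keys only.
import Mathlib
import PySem

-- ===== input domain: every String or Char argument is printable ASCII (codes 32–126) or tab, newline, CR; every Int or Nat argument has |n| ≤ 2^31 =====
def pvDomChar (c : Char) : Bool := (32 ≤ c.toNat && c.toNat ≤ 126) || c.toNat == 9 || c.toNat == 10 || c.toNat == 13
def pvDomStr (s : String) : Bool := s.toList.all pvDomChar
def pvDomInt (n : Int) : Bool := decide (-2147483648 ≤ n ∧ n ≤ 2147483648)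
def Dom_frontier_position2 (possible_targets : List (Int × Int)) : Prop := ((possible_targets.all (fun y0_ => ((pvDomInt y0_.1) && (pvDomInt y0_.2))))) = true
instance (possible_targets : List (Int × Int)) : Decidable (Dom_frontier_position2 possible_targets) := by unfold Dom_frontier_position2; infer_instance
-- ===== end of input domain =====

-- B replaces A's sort-all-tuples + groupby + per-group min/max scans by one pass
-- building a dict x -> (min_tuple, max_tuple) and sorting only the distinct keys.

-- ===== PORT A =====
-- itertools.groupby(sorted_tuples, key=fst): consecutive runs of equal first component
def pvGroupby : List (Int × Int) → List (Int × List (Int × Int))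
  | [] => []
  | p :: rest =>
    match pvGroupby rest with
    | [] => [(p.1, [p])]
    | (k, g) :: gs => if p.1 = k then (k, p :: g) :: gs else (p.1, [p]) :: (k, g) :: gs

def frontier_position2 (possible_targets : List (Int × Int)) : List (Int × Int) :=
  let sorted_tuples := PySem.List.sorted2 possible_targets (fun t => t.1) (fun t => t.2)
  let grouped := pvGroupby sorted_tuples
  grouped.foldl (fun results g =>
    match PySem.List.min? g.2 (fun t => t.2), PySem.List.max? g.2 (fun t => t.2) with
    | some min_tuple, some max_tuple =>
        (results ++ [min_tuple]) ++ (if min_tuple ≠ max_tuple then [max_tuple] else [])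
    | _, _ => results  -- unreachable: groupby's groups are nonempty, so min?/max? are some
  ) []

-- ===== PORT B =====
-- new value stored at key t.1 (Python: the if-chain updating (lo, hi))
def pvVal (e : Option ((Int × Int) × (Int × Int))) (t : Int × Int) :
    (Int × Int) × (Int × Int) :=
  match e with
  | none => (t, t)
  | some (lo, hi) => ((if t.2 < lo.2 then t else lo), (if hi.2 < t.2 then t else hi))

def pvStep (table : PySem.Dict Int ((Int × Int) × (Int × Int))) (t : Int × Int) :
    PySem.Dict Int ((Int × Int) × (Int × Int)) :=
  table.insert t.1 (pvVal (table.get? t.1) t)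

def frontier_position2_alt (possible_targets : List (Int × Int)) : List (Int × Int) :=
  let table := possible_targets.foldl pvStep PySem.Dict.empty
  (PySem.List.sorted table.keys (fun x => x)).foldl (fun results x =>
    match table.get? x with
    | some (lo, hi) => (results ++ [lo]) ++ (if hi ≠ lo then [hi] else [])
    | none => results  -- unreachable: x is iterated over table's keys
  ) []

-- ===== PRECONDITION & SPEC =====
def Spec_frontier_position2 (possible_targets : List (Int × Int)) (out : List (Int × Int)) : Prop := out = frontier_position2_alt possible_targets
instance (possible_targets : List (Int × Int)) (out : List (Int × Int)) : Decidable (Spec_frontier_position2 possible_targets out) := by unfold Spec_frontier_position2; infer_instance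

-- ===== CLAIM (what is proved, stated in full; the proofs are below) =====
def Claim_equal_frontier_position2 : Prop := ∀ (possible_targets : List (Int × Int)), Dom_frontier_position2 possible_targets → Spec_frontier_position2 possible_targets (frontier_position2 possible_targets)

-- ===== LEMMAS AND PROOFS =====

-- the lexicographic "before" predicate sorted2 uses (key = (fst, snd))
def pvLexLt (a b : Int × Int) : Bool :=
  decide (a.1 < b.1) || (!decide (b.1 < a.1) && decide (a.2 < b.2))

theorem pv_sorted2_eq (ts : List (Int × Int)) :
    PySem.List.sorted2 ts (fun t => t.1) (fun t => t.2) =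
      ts.foldl (fun acc x => PySem.List.insertBy pvLexLt x acc) [] := rfl

theorem pv_insertBy_pairwise (x : Int × Int) (ys : List (Int × Int))
    (h : ys.Pairwise (fun a b => a.1 ≤ b.1)) :
    (PySem.List.insertBy pvLexLt x ys).Pairwise (fun a b => a.1 ≤ b.1) := by
  induction ys with
  | nil => simp [PySem.List.insertBy]
  | cons y ys ih =>
    rcases List.pairwise_cons.1 h with ⟨hy, hys⟩
    by_cases hb : pvLexLt x y = true
    · rw [show PySem.List.insertBy pvLexLt x (y :: ys) = x :: y :: ys by
        simp [PySem.List.insertBy, hb]]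
      have hxy : x.1 ≤ y.1 := by
        simp only [pvLexLt, Bool.or_eq_true, Bool.and_eq_true, Bool.not_eq_true',
          decide_eq_true_eq, decide_eq_false_iff_not] at hb
        omega
      refine List.pairwise_cons.2 ⟨?_, h⟩
      intro z hz
      rcases List.mem_cons.1 hz with rfl | hz
      · exact hxy
      · exact le_trans hxy (hy z hz)
    · rw [show PySem.List.insertBy pvLexLt x (y :: ys) =
          y :: PySem.List.insertBy pvLexLt x ys by
        simp [PySem.List.insertBy, hb]]
      have hyx : y.1 ≤ x.1 := by
        simp only [pvLexLt, Bool.or_eq_true, Bool.and_eq_true, Bool.not_eq_true',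
          decide_eq_true_eq, decide_eq_false_iff_not] at hb
        omega
      refine List.pairwise_cons.2 ⟨?_, ih hys⟩
      intro z hz
      rcases (PySem.List.insertBy_mem_iff _ _ _ _).1 hz with rfl | hz
      · exact hyx
      · exact hy z hz

theorem pv_sorted2_pairwise_fst (ts : List (Int × Int)) :
    (PySem.List.sorted2 ts (fun t => t.1) (fun t => t.2)).Pairwise (fun a b => a.1 ≤ b.1) := by
  rw [pv_sorted2_eq]
  have h : ∀ (l : List (Int × Int)) (acc : List (Int × Int)),
      acc.Pairwise (fun a b => a.1 ≤ b.1) →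
      (l.foldl (fun acc x => PySem.List.insertBy pvLexLt x acc) acc).Pairwise
        (fun a b => a.1 ≤ b.1) := by
    intro l
    induction l with
    | nil => intro acc hacc; simpa using hacc
    | cons t l ih => intro acc hacc; exact ih _ (pv_insertBy_pairwise t acc hacc)
  exact h ts [] (by simp)

-- consecutive dedup of the first components (mirrors pvGroupby's key list)
def pvCkeys : List (Int × Int) → List Int
  | [] => []
  | p :: rest =>
    match pvCkeys rest with
    | [] => [p.1]
    | k :: ks => if p.1 = k then k :: ks else p.1 :: k :: ks

theorem pvCkeys_cons_eq (p : Int × Int) (l : List (Int × Int)) :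
    pvCkeys (p :: l) = match pvCkeys l with
      | [] => [p.1]
      | k :: ks => if p.1 = k then k :: ks else p.1 :: k :: ks := rfl

theorem pvGroupby_cons_eq (p : Int × Int) (l : List (Int × Int)) :
    pvGroupby (p :: l) = match pvGroupby l with
      | [] => [(p.1, [p])]
      | (k, g) :: gs => if p.1 = k then (k, p :: g) :: gs else (p.1, [p]) :: (k, g) :: gs := rfl

theorem pvCkeys_cons_cons (p : Int × Int) (l : List (Int × Int)) (k : Int) (ks : List Int)
    (h : pvCkeys l = k :: ks) :
    pvCkeys (p :: l) = if p.1 = k then k :: ks else p.1 :: k :: ks := by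
  rw [pvCkeys_cons_eq, h]

theorem pvGroupby_cons_cons (p : Int × Int) (l : List (Int × Int)) (k : Int)
    (g : List (Int × Int)) (gs : List (Int × List (Int × Int)))
    (h : pvGroupby l = (k, g) :: gs) :
    pvGroupby (p :: l) =
      if p.1 = k then (k, p :: g) :: gs else (p.1, [p]) :: (k, g) :: gs := by
  rw [pvGroupby_cons_eq, h]

theorem pv_ckeys_cons (q : Int × Int) (l : List (Int × Int)) :
    ∃ ks, pvCkeys (q :: l) = q.1 :: ks := by
  induction l generalizing q with
  | nil => exact ⟨[], rfl⟩
  | cons q' l' ih =>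
    obtain ⟨ks, hks⟩ := ih q'
    by_cases h : q.1 = q'.1
    · exact ⟨ks, by rw [pvCkeys_cons_cons q _ _ _ hks]; simp [h]⟩
    · exact ⟨q'.1 :: ks, by rw [pvCkeys_cons_cons q _ _ _ hks]; simp [h]⟩

theorem pv_mem_ckeys (l : List (Int × Int)) (x : Int) :
    x ∈ pvCkeys l ↔ x ∈ l.map Prod.fst := by
  induction l with
  | nil => simp [pvCkeys]
  | cons p l ih =>
    cases l with
    | nil => simp [pvCkeys]
    | cons q l' =>
      obtain ⟨ks, hks⟩ := pv_ckeys_cons q l'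
      rw [pvCkeys_cons_cons p _ _ _ hks]
      by_cases h : p.1 = q.1
      · rw [if_pos h, ← hks, ih]
        simp only [List.map_cons, List.mem_cons]
        constructor
        · intro hx; exact Or.inr hx
        · rintro (rfl | hx)
          · rw [h]; exact Or.inl rfl
          · exact hx
      · rw [if_neg h]
        have hih := ih
        rw [hks] at hih
        simp only [List.mem_cons, List.map_cons] at hih ⊢
        tauto

theorem pv_ckeys_pairwise_lt (l : List (Int × Int))
    (h : l.Pairwise (fun a b => a.1 ≤ b.1)) :
    (pvCkeys l).Pairwise (· < ·) := by
  induction l with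
  | nil => simp [pvCkeys]
  | cons p l ih =>
    rcases List.pairwise_cons.1 h with ⟨hp, hl⟩
    cases l with
    | nil => simp [pvCkeys]
    | cons q l' =>
      obtain ⟨ks, hks⟩ := pv_ckeys_cons q l'
      rw [pvCkeys_cons_cons p _ _ _ hks]
      by_cases hpq : p.1 = q.1
      · rw [if_pos hpq, ← hks]; exact ih hl
      · rw [if_neg hpq, ← hks]
        refine List.pairwise_cons.2 ⟨?_, ih hl⟩
        intro z hz
        have hzm : z ∈ (q :: l').map Prod.fst := (pv_mem_ckeys _ _).1 hz
        have hq : q.1 ≤ z := by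
          rcases List.mem_map.1 hzm with ⟨r, hr, rfl⟩
          rcases List.mem_cons.1 hr with rfl | hr
          · exact le_refl _
          · exact (List.pairwise_cons.1 hl).1 r hr
        have hpz : p.1 ≤ q.1 := hp q List.mem_cons_self
        omega

theorem pv_groupby_eq (l : List (Int × Int))
    (h : l.Pairwise (fun a b => a.1 ≤ b.1)) :
    pvGroupby l = (pvCkeys l).map (fun x => (x, l.filter (fun t => t.1 == x))) := by
  induction l with
  | nil => rfl
  | cons p l ih =>
    rcases List.pairwise_cons.1 h with ⟨hp, hl⟩
    cases l with
    | nil => simp [pvGroupby, pvCkeys]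
    | cons q l' =>
      obtain ⟨ks, hks⟩ := pv_ckeys_cons q l'
      have hkw : (pvCkeys (q :: l')).Pairwise (· < ·) := pv_ckeys_pairwise_lt _ hl
      have ihh := ih hl
      rw [hks] at ihh
      simp only [List.map_cons] at ihh
      rw [pvGroupby_cons_cons p _ _ _ _ ihh, pvCkeys_cons_cons p _ _ _ hks]
      have hks_gt : ∀ z ∈ ks, q.1 < z := by
        intro z hz
        rw [hks] at hkw
        exact (List.pairwise_cons.1 hkw).1 z hz
      by_cases hpq : p.1 = q.1
      · rw [if_pos hpq, if_pos hpq]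
        simp only [List.map_cons]
        refine List.cons_eq_cons.2 ⟨?_, ?_⟩
        · simp [hpq]
        · apply List.map_congr_left
          intro z hz
          have h1 := hks_gt z hz
          have e1 : (p.1 == z) = false := by
            simp only [beq_eq_false_iff_ne, ne_eq]; omega
          simp [List.filter_cons, e1]
      · rw [if_neg hpq, if_neg hpq]
        have h3 : p.1 ≤ q.1 := hp q List.mem_cons_self
        have hplt : ∀ t ∈ q :: l', p.1 < t.1 := by
          intro t ht
          have h1 : p.1 ≤ t.1 := hp t ht
          rcases List.mem_cons.1 ht with rfl | ht
          · omega
          · have h2 : q.1 ≤ t.1 := (List.pairwise_cons.1 hl).1 t ht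
            omega
        have hfilt : ∀ z : Int, q.1 ≤ z →
            (p :: q :: l').filter (fun t => t.1 == z) =
              (q :: l').filter (fun t => t.1 == z) := by
          intro z hzq
          have e1 : (p.1 == z) = false := by
            simp only [beq_eq_false_iff_ne, ne_eq]; omega
          simp [List.filter_cons, e1]
        simp only [List.map_cons]
        refine List.cons_eq_cons.2 ⟨?_, List.cons_eq_cons.2 ⟨?_, ?_⟩⟩
        · have hnil : (q :: l').filter (fun t => t.1 == p.1) = [] := by
            rw [List.filter_eq_nil_iff]
            intro t ht
            have := hplt t ht
            simp only [beq_eq_false_iff_ne, ne_eq, Bool.not_eq_true]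
            omega
          simp [hnil]
        · rw [hfilt q.1 le_rfl]
        · apply List.map_congr_left
          intro z hz
          have h1 := hks_gt z hz
          rw [hfilt z (le_of_lt h1)]

-- B's dict fold, keyed lookup
theorem pv_get_foldl_step (ts : List (Int × Int))
    (d : PySem.Dict Int ((Int × Int) × (Int × Int))) (x : Int) :
    (ts.foldl pvStep d).get? x =
      (ts.filter (fun t => t.1 == x)).foldl (fun e t => some (pvVal e t)) (d.get? x) := by
  induction ts generalizing d with
  | nil => simp
  | cons t ts ih =>
    simp only [List.foldl_cons]
    rw [ih (pvStep d t)]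
    by_cases hx : t.1 = x
    · rw [List.filter_cons_of_pos (by simp [hx])]
      simp only [List.foldl_cons]
      congr 1
      rw [pvStep, PySem.Dict.get?_insert, if_pos hx.symm, hx]
    · rw [List.filter_cons_of_neg (by simp [hx])]
      congr 1
      rw [pvStep, PySem.Dict.get?_insert, if_neg (fun hc => hx hc.symm)]

def pvPairStep (s : (Int × Int) × (Int × Int)) (t : Int × Int) :
    (Int × Int) × (Int × Int) :=
  ((if t.2 < s.1.2 then t else s.1), (if s.2.2 < t.2 then t else s.2))

theorem pv_foldl_opt (l : List (Int × Int)) (s : (Int × Int) × (Int × Int)) :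
    l.foldl (fun e t => some (pvVal e t)) (some s) = some (l.foldl pvPairStep s) := by
  induction l generalizing s with
  | nil => rfl
  | cons t l ih =>
    obtain ⟨lo, hi⟩ := s
    simp only [List.foldl_cons]
    rw [ih]
    rfl

def pvMinF (a : Int × Int) (t : Int × Int) : Int × Int := if t.2 < a.2 then t else a
def pvMaxF (b : Int × Int) (t : Int × Int) : Int × Int := if b.2 < t.2 then t else b

theorem pv_pairStep_eq (l : List (Int × Int)) (a b : Int × Int) :
    l.foldl pvPairStep (a, b) = (l.foldl pvMinF a, l.foldl pvMaxF b) := by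
  have h : pvPairStep = fun (s : (Int × Int) × (Int × Int)) e => (pvMinF s.1 e, pvMaxF s.2 e) := rfl
  rw [h, PySem.List.foldl_prod_mk]

theorem pv_minFold (l : List (Int × Int)) (a : Int × Int) :
    l.foldl pvMinF a ∈ a :: l ∧ (l.foldl pvMinF a).2 ≤ a.2 ∧
    (∀ y ∈ l, (l.foldl pvMinF a).2 ≤ y.2) := by
  induction l generalizing a with
  | nil => simp
  | cons t l ih =>
    simp only [List.foldl_cons]
    rcases ih (pvMinF a t) with ⟨h1, h2, h3⟩
    by_cases hc : t.2 < a.2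
    · simp only [pvMinF, if_pos hc] at h1 h2 h3 ⊢
      refine ⟨List.mem_cons_of_mem _ h1, by omega, ?_⟩
      intro y hy
      rcases List.mem_cons.1 hy with rfl | hy
      · exact h2
      · exact h3 y hy
    · simp only [pvMinF, if_neg hc] at h1 h2 h3 ⊢
      refine ⟨?_, h2, ?_⟩
      · rcases List.mem_cons.1 h1 with h | h <;> simp [h]
      · intro y hy
        rcases List.mem_cons.1 hy with rfl | hy
        · omega
        · exact h3 y hy

theorem pv_maxFold (l : List (Int × Int)) (b : Int × Int) :
    l.foldl pvMaxF b ∈ b :: l ∧ b.2 ≤ (l.foldl pvMaxF b).2 ∧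
    (∀ y ∈ l, y.2 ≤ (l.foldl pvMaxF b).2) := by
  induction l generalizing b with
  | nil => simp
  | cons t l ih =>
    simp only [List.foldl_cons]
    rcases ih (pvMaxF b t) with ⟨h1, h2, h3⟩
    by_cases hc : b.2 < t.2
    · simp only [pvMaxF, if_pos hc] at h1 h2 h3 ⊢
      refine ⟨List.mem_cons_of_mem _ h1, by omega, ?_⟩
      intro y hy
      rcases List.mem_cons.1 hy with rfl | hy
      · exact h2
      · exact h3 y hy
    · simp only [pvMaxF, if_neg hc] at h1 h2 h3 ⊢
      refine ⟨?_, h2, ?_⟩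
      · rcases List.mem_cons.1 h1 with h | h <;> simp [h]
      · intro y hy
        rcases List.mem_cons.1 hy with rfl | hy
        · omega
        · exact h3 y hy

theorem pv_pair_min_unique {l₁ l₂ : List (Int × Int)} {x : Int} {m₁ m₂ : Int × Int}
    (hmem : ∀ p : Int × Int, p ∈ l₁ ↔ p ∈ l₂)
    (hfst : ∀ p ∈ l₁, p.1 = x)
    (h1 : m₁ ∈ l₁) (h2 : m₂ ∈ l₂)
    (hmin1 : ∀ y ∈ l₁, m₁.2 ≤ y.2) (hmin2 : ∀ y ∈ l₂, m₂.2 ≤ y.2) : m₁ = m₂ := by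
  have h2' : m₂ ∈ l₁ := (hmem m₂).2 h2
  have h1' : m₁ ∈ l₂ := (hmem m₁).1 h1
  have e1 : m₁.2 ≤ m₂.2 := hmin1 m₂ h2'
  have e2 : m₂.2 ≤ m₁.2 := hmin2 m₁ h1'
  have f1 : m₁.1 = x := hfst m₁ h1
  have f2 : m₂.1 = x := hfst m₂ h2'
  exact Prod.ext (by omega) (by omega)

theorem pv_pair_max_unique {l₁ l₂ : List (Int × Int)} {x : Int} {m₁ m₂ : Int × Int}
    (hmem : ∀ p : Int × Int, p ∈ l₁ ↔ p ∈ l₂)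
    (hfst : ∀ p ∈ l₁, p.1 = x)
    (h1 : m₁ ∈ l₁) (h2 : m₂ ∈ l₂)
    (hmax1 : ∀ y ∈ l₁, y.2 ≤ m₁.2) (hmax2 : ∀ y ∈ l₂, y.2 ≤ m₂.2) : m₁ = m₂ := by
  have h2' : m₂ ∈ l₁ := (hmem m₂).2 h2
  have h1' : m₁ ∈ l₂ := (hmem m₁).1 h1
  have e1 : m₂.2 ≤ m₁.2 := hmax1 m₂ h2'
  have e2 : m₁.2 ≤ m₂.2 := hmax2 m₁ h1'
  have f1 : m₁.1 = x := hfst m₁ h1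
  have f2 : m₂.1 = x := hfst m₂ h2'
  exact Prod.ext (by omega) (by omega)

theorem pv_filter_fst (l : List (Int × Int)) (x : Int) :
    ∀ t ∈ l.filter (fun t => t.1 == x), t.1 = x := by
  intro t ht
  have := List.of_mem_filter ht
  simpa using this

theorem pv_table_keys (ts : List (Int × Int)) :
    (ts.foldl pvStep PySem.Dict.empty).keys = PySem.Set.ofList (ts.map Prod.fst) := by
  have h : ts.foldl pvStep PySem.Dict.empty =
      ts.foldl (fun d t => d.insert (Prod.fst t) ((fun d (t : Int × Int) => pvVal (d.get? t.1) t) d t))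
        PySem.Dict.empty := rfl
  rw [h, PySem.Dict.keys_foldl_insert_key, PySem.Dict.keys_empty]
  rfl

theorem pv_main (ts : List (Int × Int)) :
    frontier_position2 ts = frontier_position2_alt ts := by
  have hSp := pv_sorted2_pairwise_fst ts
  have hperm : (PySem.List.sorted2 ts (fun t => t.1) (fun t => t.2)).Perm ts :=
    PySem.List.sorted2_perm ts _ _ _
  have hck := pv_ckeys_pairwise_lt _ hSp
  have hK : PySem.List.sorted (ts.foldl pvStep PySem.Dict.empty).keys (fun x => x) =
      pvCkeys (PySem.List.sorted2 ts (fun t => t.1) (fun t => t.2)) := by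
    rw [pv_table_keys]
    apply PySem.List.sorted_eq_of_perm_of_pairwise_lt
    · have hnd : (pvCkeys (PySem.List.sorted2 ts (fun t => t.1) (fun t => t.2))).Nodup :=
        hck.imp (fun h => ne_of_lt h)
      rw [List.perm_ext_iff_of_nodup hnd (PySem.Set.nodup_ofList _)]
      intro a
      rw [pv_mem_ckeys, PySem.Set.mem_ofList]
      exact (hperm.map Prod.fst).mem_iff
    · exact hck
  simp only [frontier_position2, frontier_position2_alt]
  rw [hK, pv_groupby_eq _ hSp, List.foldl_map]
  apply PySem.List.foldl_congr_mem
  intro acc x hx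
  dsimp only
  -- x really occurs among the first components
  have hxS : x ∈ (PySem.List.sorted2 ts (fun t => t.1) (fun t => t.2)).map Prod.fst :=
    (pv_mem_ckeys _ x).1 hx
  have hxts : x ∈ ts.map Prod.fst := ((hperm.map Prod.fst).mem_iff).1 hxS
  obtain ⟨t0, rest, hF⟩ : ∃ t0 rest, ts.filter (fun t => t.1 == x) = t0 :: rest := by
    rcases List.mem_map.1 hxts with ⟨p, hp, hpx⟩
    have hpf : p ∈ ts.filter (fun t => t.1 == x) := List.mem_filter.2 ⟨hp, by simp [hpx]⟩
    cases hFe : ts.filter (fun t => t.1 == x) with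
    | nil => rw [hFe] at hpf; simp at hpf
    | cons a b => exact ⟨a, b, rfl⟩
  -- B's table entry at x
  have htab : (ts.foldl pvStep PySem.Dict.empty).get? x =
      some (rest.foldl pvMinF t0, rest.foldl pvMaxF t0) := by
    rw [pv_get_foldl_step, PySem.Dict.get?_empty, hF]
    show rest.foldl (fun e t => some (pvVal e t)) (some (t0, t0)) = _
    rw [pv_foldl_opt, pv_pairStep_eq]
  -- A's group at x is nonempty, its min?/max? are defined
  have hmemiff : ∀ p : Int × Int,
      p ∈ (PySem.List.sorted2 ts (fun t => t.1) (fun t => t.2)).filter (fun t => t.1 == x) ↔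
        p ∈ ts.filter (fun t => t.1 == x) := fun p => ((hperm.filter _).mem_iff)
  have hFSne : (PySem.List.sorted2 ts (fun t => t.1) (fun t => t.2)).filter
      (fun t => t.1 == x) ≠ [] := by
    intro h0
    have ht0 : t0 ∈ ts.filter (fun t => t.1 == x) := by rw [hF]; exact List.mem_cons_self
    rw [← hmemiff t0, h0] at ht0
    simp at ht0
  obtain ⟨mn, hmn⟩ : ∃ mn, PySem.List.min?
      ((PySem.List.sorted2 ts (fun t => t.1) (fun t => t.2)).filter (fun t => t.1 == x))
      (fun t => t.2) = some mn := by
    cases hm : PySem.List.min?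
        ((PySem.List.sorted2 ts (fun t => t.1) (fun t => t.2)).filter (fun t => t.1 == x))
        (fun t => t.2) with
    | none => exact absurd ((PySem.List.min?_eq_none_iff _ _).1 hm) hFSne
    | some m => exact ⟨m, rfl⟩
  obtain ⟨mx, hmx⟩ : ∃ mx, PySem.List.max?
      ((PySem.List.sorted2 ts (fun t => t.1) (fun t => t.2)).filter (fun t => t.1 == x))
      (fun t => t.2) = some mx := by
    cases hm : PySem.List.max?
        ((PySem.List.sorted2 ts (fun t => t.1) (fun t => t.2)).filter (fun t => t.1 == x))
        (fun t => t.2) with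
    | none => exact absurd ((PySem.List.max?_eq_none_iff _ _).1 hm) hFSne
    | some m => exact ⟨m, rfl⟩
  -- B's stored pair is extremal over the same elements
  obtain ⟨hlo_mem, hlo_le, hlo_min⟩ := pv_minFold rest t0
  obtain ⟨hhi_mem, hhi_ge, hhi_max⟩ := pv_maxFold rest t0
  have hlo_memF : rest.foldl pvMinF t0 ∈ ts.filter (fun t => t.1 == x) := by
    rw [hF]; exact hlo_mem
  have hhi_memF : rest.foldl pvMaxF t0 ∈ ts.filter (fun t => t.1 == x) := by
    rw [hF]; exact hhi_mem
  have hlo_minF : ∀ y ∈ ts.filter (fun t => t.1 == x), (rest.foldl pvMinF t0).2 ≤ y.2 := by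
    intro y hy
    rw [hF] at hy
    rcases List.mem_cons.1 hy with rfl | hy
    · exact hlo_le
    · exact hlo_min y hy
  have hhi_maxF : ∀ y ∈ ts.filter (fun t => t.1 == x), y.2 ≤ (rest.foldl pvMaxF t0).2 := by
    intro y hy
    rw [hF] at hy
    rcases List.mem_cons.1 hy with rfl | hy
    · exact hhi_ge
    · exact hhi_max y hy
  have hmneq : mn = rest.foldl pvMinF t0 :=
    pv_pair_min_unique hmemiff (pv_filter_fst _ x) (PySem.List.min?_mem hmn) hlo_memF
      (fun y hy => PySem.List.min?_isMin hmn y hy) hlo_minF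
  have hmxeq : mx = rest.foldl pvMaxF t0 :=
    pv_pair_max_unique hmemiff (pv_filter_fst _ x) (PySem.List.max?_mem hmx) hhi_memF
      (fun y hy => PySem.List.max?_isMax hmx y hy) hhi_maxF
  rw [hmn, hmx, htab]
  show (acc ++ [mn]) ++ (if mn ≠ mx then [mx] else []) =
    (acc ++ [rest.foldl pvMinF t0]) ++
      (if rest.foldl pvMaxF t0 ≠ rest.foldl pvMinF t0 then [rest.foldl pvMaxF t0] else [])
  rw [hmneq, hmxeq]
  rcases eq_or_ne (rest.foldl pvMinF t0) (rest.foldl pvMaxF t0) with he | he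
  · rw [if_neg (by simp [he]), if_neg (by simp [he])]
  · rw [if_pos he, if_pos (Ne.symm he)]

-- ===== VERDICT (by name: the statement is the Claim_ definition above) =====
theorem frontier_position2_spec : Claim_equal_frontier_position2 := by
  intro ts _
  unfold Spec_frontier_position2
  exact pv_main ts
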